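-- pv_equiv track=rewrite | github.com/SunshineCTF/SunshineCTF-2022-Public | Scripting/PredictorProgrammer3/autosolver/seed_solver.py | calcSeed
-- ===== SOURCE A (Python) =====
-- def calcSeed(a, k, modulus, nr, nth):
--     retval = nr
--     for i in range(0, nth):
--         retval -= k
--         retval %= modulus
--         # multiply by the inverse -> in the original paper this was a neat divide... lol
--         retval *= modinv(a, modulus)
--         retval %= modulus
--     return retval
--
-- def egcd(a, b):
--     if a == 0:
--         return (b, 0, 1)
--     else:
--         g, y, x = egcd(b % a, a)
--         return (g, x - (b // a) * y, y)
--
-- def modinv(a, m):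
--     g, x, _ = egcd(a, m)
--     if g != 1:
--         raise Exception('modular inverse does not exist')
--     else:
--         return x % m
-- ===== SOURCE B (Python) =====
-- def _inv(a, m):
--     # iterative extended Euclid on (a, abs(m)); returns a^-1 reduced mod m
--     n = abs(m)
--     old_r, r = a, n
--     old_s, s = 1, 0
--     while r != 0:
--         q = old_r // r
--         old_r, r = r, old_r - q * r
--         old_s, s = s, old_s - q * s
--     if old_r != 1:
--         raise Exception('modular inverse does not exist')
--     return old_s % m
--
-- def _pow_geom(b, n, m):
--     # (b**n % m, (b + b**2 + ... + b**n) % m) by halving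
--     if n <= 1:
--         return (b % m, b % m)
--     p, s = _pow_geom(b, n // 2, m)
--     p, s = (p * p) % m, (s * (1 + p)) % m
--     if n % 2:
--         p, s = (p * b) % m, (s * b + b) % m
--     return (p, s)
--
-- def calcSeed(a, k, modulus, nr, nth):
--     # Undoing one LCG step is x -> b*(x - k) mod modulus with b = a^{-1} mod modulus;
--     # nth steps give the closed form b^nth*nr - k*(b + b^2 + ... + b^nth) mod modulus,
--     # computed with O(log nth) multiplications.
--     if nth <= 0:
--         return nr
--     b = _inv(a, modulus)
--     p, s = _pow_geom(b, nth, modulus)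
--     return (p * nr - k * s) % modulus
-- ===== Notes on version B (the rewrite author's own statement) =====
-- stated objective: faster
-- what changed: Instead of looping nth times (each step calling a recursive egcd-based modinv), B computes the closed form b^nth*nr - k*(b+...+b^nth) mod m: one iterative extended Euclid for b = a^-1 plus a halving recursion that yields the power and the geometric sum together.
import Mathlib
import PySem

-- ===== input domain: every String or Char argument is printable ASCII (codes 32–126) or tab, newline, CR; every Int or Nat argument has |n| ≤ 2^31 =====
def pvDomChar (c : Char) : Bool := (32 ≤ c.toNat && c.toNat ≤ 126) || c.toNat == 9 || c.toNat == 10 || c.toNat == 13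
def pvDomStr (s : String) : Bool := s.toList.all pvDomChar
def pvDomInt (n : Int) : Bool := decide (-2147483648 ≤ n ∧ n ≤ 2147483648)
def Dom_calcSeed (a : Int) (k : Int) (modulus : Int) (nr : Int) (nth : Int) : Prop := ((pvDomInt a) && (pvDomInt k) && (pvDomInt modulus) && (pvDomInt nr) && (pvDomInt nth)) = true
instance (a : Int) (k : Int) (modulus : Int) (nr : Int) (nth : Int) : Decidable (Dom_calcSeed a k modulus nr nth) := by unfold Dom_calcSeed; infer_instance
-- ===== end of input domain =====

-- B replaces A's nth-step inverse-LCG loop (a recursive egcd-based modinv each step) by the closed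
-- form b^nth*nr - k*(b+...+b^nth) mod m, via an iterative extended Euclid and a halving recursion;
-- a timing run measured B faster at the largest size.

-- termination measure for Python's '%'-based Euclid recursions (cited by both ports)
theorem pymod_natAbs_lt (b a : Int) (h : ¬ a = 0) : (PySem.Int.mod b a).natAbs < a.natAbs := by
  rcases lt_or_gt_of_ne h with hneg | hpos
  · have := PySem.Int.mod_neg_bounds (a := b) hneg; omega
  · have h1 := PySem.Int.mod_nonneg (a := b) hpos
    have h2 := PySem.Int.mod_lt (a := b) hpos
    omega

-- ===== PORT A =====
def pyEgcd (a b : Int) : Int × Int × Int :=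
  if h : a = 0 then (b, 0, 1)
  else
    let r := pyEgcd (PySem.Int.mod b a) a
    (r.1, r.2.2 - (PySem.Int.floordiv b a) * r.2.1, r.2.1)
termination_by a.natAbs
decreasing_by exact pymod_natAbs_lt b a h

-- Python's modinv raises when g != 1; those inputs are excluded by Pre_, the raise branch returns 0
def pyModinv (a m : Int) : Int :=
  let g := pyEgcd a m
  if g.1 ≠ 1 then 0 else PySem.Int.mod g.2.1 m

def calcSeed (a : Int) (k : Int) (modulus : Int) (nr : Int) (nth : Int) : Int :=
  (PySem.List.pyRange 0 nth 1).foldl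
    (fun retval _ =>
      PySem.Int.mod (PySem.Int.mod (retval - k) modulus * pyModinv a modulus) modulus)
    nr

-- ===== PORT B =====
-- the while-loop of Source B's _inv: state (old_r, r, old_s, s)
def invLoop (old_r r old_s s : Int) : Int × Int :=
  if h : r ≠ 0 then
    invLoop r (old_r - PySem.Int.floordiv old_r r * r) s (old_s - PySem.Int.floordiv old_r r * s)
  else (old_r, old_s)
termination_by r.natAbs
decreasing_by
  have h1 := PySem.Int.floordiv_mul_add_mod old_r r
  have h2 := pymod_natAbs_lt old_r r h
  have he : old_r - PySem.Int.floordiv old_r r * r = PySem.Int.mod old_r r := by linarith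
  rw [he]; exact h2

-- Source B's _inv; the raise branch (never reached inside Pre_) returns 0
def pyInv (a m : Int) : Int :=
  let fin := invLoop a |m| 1 0
  if fin.1 ≠ 1 then 0 else PySem.Int.mod fin.2 m

-- Source B's _pow_geom
def powGeom (b n m : Int) : Int × Int :=
  if h : n ≤ 1 then (PySem.Int.mod b m, PySem.Int.mod b m)
  else
    let ps := powGeom b (PySem.Int.floordiv n 2) m
    let p := PySem.Int.mod (ps.1 * ps.1) m
    let s := PySem.Int.mod (ps.2 * (1 + ps.1)) m
    if PySem.Int.mod n 2 = 1 then (PySem.Int.mod (p * b) m, PySem.Int.mod (s * b + b) m)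
    else (p, s)
termination_by n.toNat
decreasing_by
  have := PySem.Int.floordiv_eq_ediv_of_pos (a := n) (b := 2) (by omega)
  rw [this]; omega

def calcSeed_alt (a : Int) (k : Int) (modulus : Int) (nr : Int) (nth : Int) : Int :=
  if nth ≤ 0 then nr
  else
    let b := pyInv a modulus
    let ps := powGeom b nth modulus
    PySem.Int.mod (ps.1 * nr - k * ps.2) modulus

-- ===== PRECONDITION & SPEC =====
-- Pre_ excludes exactly the inputs where Python A raises: modulus = 0 (ZeroDivisionError) and the
-- inputs where A's egcd-based modinv raises 'modular inverse does not exist' (a < 0 always, a > 0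
-- with gcd(a, modulus) ≠ 1, a = 0 with modulus ≠ 1) — only reached when the loop runs (nth ≥ 1).
def Pre_calcSeed (a : Int) (k : Int) (modulus : Int) (nr : Int) (nth : Int) : Prop :=
  nth ≤ 0 ∨ (modulus ≠ 0 ∧ ((0 < a ∧ Int.gcd a modulus = 1) ∨ (a = 0 ∧ modulus = 1)))
instance (a : Int) (k : Int) (modulus : Int) (nr : Int) (nth : Int) : Decidable (Pre_calcSeed a k modulus nr nth) := by unfold Pre_calcSeed; infer_instance
def pvWitness_calcSeed : Int × Int × Int × Int × Int := (3, 5, 7, 10, 4)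

def Spec_calcSeed (a : Int) (k : Int) (modulus : Int) (nr : Int) (nth : Int) (out : Int) : Prop := out = calcSeed_alt a k modulus nr nth
instance (a : Int) (k : Int) (modulus : Int) (nr : Int) (nth : Int) (out : Int) : Decidable (Spec_calcSeed a k modulus nr nth out) := by unfold Spec_calcSeed; infer_instance

-- ===== CLAIM (what is proved, stated in full; the proofs are below) =====
def Claim_equal_calcSeed : Prop := ∀ (a : Int) (k : Int) (modulus : Int) (nr : Int) (nth : Int), Dom_calcSeed a k modulus nr nth → Pre_calcSeed a k modulus nr nth → Spec_calcSeed a k modulus nr nth (calcSeed a k modulus nr nth)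

-- ===== LEMMAS AND PROOFS =====

-- Python mod depends only on the residue class (m ≠ 0)
theorem pymod_congr {m : Int} (hm : m ≠ 0) {x y : Int} (h : m ∣ x - y) :
    PySem.Int.mod x m = PySem.Int.mod y m := by
  have hx := PySem.Int.floordiv_mul_add_mod x m
  have hy := PySem.Int.floordiv_mul_add_mod y m
  have hdvd : m ∣ PySem.Int.mod x m - PySem.Int.mod y m := by
    obtain ⟨t, ht⟩ := h
    exact ⟨t - PySem.Int.floordiv x m + PySem.Int.floordiv y m, by linear_combination hx - hy + ht⟩
  by_contra hne
  have hne' : PySem.Int.mod x m - PySem.Int.mod y m ≠ 0 := sub_ne_zero.mpr hne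
  have habs : |m| ≤ |PySem.Int.mod x m - PySem.Int.mod y m| :=
    Int.le_of_dvd (abs_pos.mpr hne') ((abs_dvd _ _).mpr ((dvd_abs _ _).mpr hdvd))
  rcases lt_or_gt_of_ne hm with hneg | hpos
  · have bx := PySem.Int.mod_neg_bounds (a := x) hneg
    have byy := PySem.Int.mod_neg_bounds (a := y) hneg
    rcases abs_cases m with ⟨h1, h2⟩ | ⟨h1, h2⟩ <;>
      rcases abs_cases (PySem.Int.mod x m - PySem.Int.mod y m) with ⟨h3, h4⟩ | ⟨h3, h4⟩ <;> omega
  · have bx1 := PySem.Int.mod_nonneg (a := x) hpos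
    have bx2 := PySem.Int.mod_lt (a := x) hpos
    have by1 := PySem.Int.mod_nonneg (a := y) hpos
    have by2 := PySem.Int.mod_lt (a := y) hpos
    rcases abs_cases m with ⟨h1, h2⟩ | ⟨h1, h2⟩ <;>
      rcases abs_cases (PySem.Int.mod x m - PySem.Int.mod y m) with ⟨h3, h4⟩ | ⟨h3, h4⟩ <;> omega

theorem mdvd_sub_mod {m : Int} (x : Int) : m ∣ PySem.Int.mod x m - x := by
  have := PySem.Int.floordiv_mul_add_mod x m
  exact ⟨-(PySem.Int.floordiv x m), by linarith⟩

theorem pymod_pymod {m : Int} (hm : m ≠ 0) (x : Int) :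
    PySem.Int.mod (PySem.Int.mod x m) m = PySem.Int.mod x m :=
  pymod_congr hm (mdvd_sub_mod x)

theorem dvd_sub_mul {m x x' y y' : Int} (h1 : m ∣ x - x') (h2 : m ∣ y - y') :
    m ∣ x * y - x' * y' := by
  obtain ⟨t, ht⟩ := h1; obtain ⟨u, hu⟩ := h2
  exact ⟨t * y + x' * u, by linear_combination y * ht + x' * hu⟩

-- the ideal geometric sum: geo c j = c + c^2 + … + c^j
def geo (c : Int) : Nat → Int
  | 0 => 0
  | j + 1 => c * (1 + geo c j)

theorem geo_add (c : Int) (p q : Nat) : geo c (p + q) = geo c q + c ^ q * geo c p := by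
  induction q with
  | zero => simp [geo]
  | succ j ih =>
    have h : p + (j + 1) = (p + j) + 1 := by omega
    rw [h, geo, ih, geo]
    ring

-- ---- Bézout facts about A's recursive egcd ----
theorem pyEgcd_bezout (a b : Int) :
    a * (pyEgcd a b).2.1 + b * (pyEgcd a b).2.2 = (pyEgcd a b).1 := by
  induction hn : a.natAbs using Nat.strong_induction_on generalizing a b with
  | _ n ih =>
    rw [pyEgcd]
    by_cases h : a = 0
    · simp [h]
    · simp only [h, dite_false]
      have hlt : (PySem.Int.mod b a).natAbs < n := hn ▸ pymod_natAbs_lt b a h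
      have hrec := ih _ hlt (PySem.Int.mod b a) a rfl
      have hfd := PySem.Int.floordiv_mul_add_mod b a
      linear_combination hrec - (pyEgcd (PySem.Int.mod b a) a).2.1 * hfd

theorem pyEgcd_dvd (a b : Int) : (pyEgcd a b).1 ∣ a ∧ (pyEgcd a b).1 ∣ b := by
  induction hn : a.natAbs using Nat.strong_induction_on generalizing a b with
  | _ n ih =>
    rw [pyEgcd]
    by_cases h : a = 0
    · simp [h]
    · simp only [h, dite_false]
      have hlt : (PySem.Int.mod b a).natAbs < n := hn ▸ pymod_natAbs_lt b a h
      obtain ⟨d1, d2⟩ := ih _ hlt (PySem.Int.mod b a) a rfl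
      refine ⟨d2, ?_⟩
      have hfd := PySem.Int.floordiv_mul_add_mod b a
      have hsum : (pyEgcd (PySem.Int.mod b a) a).1 ∣
          PySem.Int.floordiv b a * a + PySem.Int.mod b a :=
        dvd_add (Dvd.dvd.mul_left d2 _) d1
      have hb : PySem.Int.floordiv b a * a + PySem.Int.mod b a = b := by linarith
      rwa [hb] at hsum

theorem pyEgcd_nonneg (a b : Int) (ha : 0 ≤ a) (hb : 0 ≤ b) : 0 ≤ (pyEgcd a b).1 := by
  induction hn : a.natAbs using Nat.strong_induction_on generalizing a b with
  | _ n ih =>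
    rw [pyEgcd]
    by_cases h : a = 0
    · simpa [h]
    · simp only [h, dite_false]
      have hlt : (PySem.Int.mod b a).natAbs < n := hn ▸ pymod_natAbs_lt b a h
      exact ih _ hlt _ _ (PySem.Int.mod_nonneg b (by omega)) ha rfl

-- under Pre_ (nth ≥ 1 branch) A's egcd returns g = 1, so pyModinv is an inverse of a mod m
theorem pyModinv_inv (a m : Int) (hm : m ≠ 0)
    (h : (0 < a ∧ Int.gcd a m = 1) ∨ (a = 0 ∧ m = 1)) :
    m ∣ a * pyModinv a m - 1 := by
  rcases h with ⟨ha, hg⟩ | ⟨ha, hm1⟩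
  · have hg1 : (pyEgcd a m).1 = 1 := by
      obtain ⟨d1, d2⟩ := pyEgcd_dvd a m
      have hdg : (pyEgcd a m).1.natAbs ∣ Int.gcd a m :=
        Nat.dvd_gcd (Int.natAbs_dvd_natAbs.mpr d1) (Int.natAbs_dvd_natAbs.mpr d2)
      rw [hg] at hdg
      have habs : (pyEgcd a m).1.natAbs = 1 := Nat.dvd_one.mp hdg
      have hnn : 0 ≤ (pyEgcd a m).1 := by
        rw [pyEgcd]
        have ha0 : ¬ a = 0 := by omega
        simp only [ha0, dite_false]
        exact pyEgcd_nonneg _ _ (PySem.Int.mod_nonneg m (by omega)) (by omega)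
      omega
    unfold pyModinv
    rw [if_neg (by simp [hg1])]
    have hb := pyEgcd_bezout a m
    rw [hg1] at hb
    obtain ⟨u, hu⟩ := mdvd_sub_mod (m := m) (pyEgcd a m).2.1
    exact ⟨a * u - (pyEgcd a m).2.2, by linear_combination a * hu + hb⟩
  · rw [hm1]; exact one_dvd _

-- ---- facts about B's iterative extended Euclid ----
theorem invLoop_dvd (old_r r old_s s : Int) :
    (invLoop old_r r old_s s).1 ∣ old_r ∧ (invLoop old_r r old_s s).1 ∣ r := by
  induction hn : r.natAbs using Nat.strong_induction_on generalizing old_r r old_s s with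
  | _ n ih =>
    rw [invLoop]
    by_cases h : r ≠ 0
    · rw [dif_pos h]
      have he : old_r - PySem.Int.floordiv old_r r * r = PySem.Int.mod old_r r := by
        have := PySem.Int.floordiv_mul_add_mod old_r r; linarith
      have hlt : (old_r - PySem.Int.floordiv old_r r * r).natAbs < n := by
        rw [he]; exact hn ▸ pymod_natAbs_lt old_r r h
      obtain ⟨d1, d2⟩ := ih _ hlt r (old_r - PySem.Int.floordiv old_r r * r) s
        (old_s - PySem.Int.floordiv old_r r * s) rfl
      refine ⟨?_, d1⟩
      have hsum : (invLoop r (old_r - PySem.Int.floordiv old_r r * r) s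
          (old_s - PySem.Int.floordiv old_r r * s)).1 ∣
          (old_r - PySem.Int.floordiv old_r r * r) + PySem.Int.floordiv old_r r * r :=
        dvd_add d2 (Dvd.dvd.mul_left d1 _)
      have hor : (old_r - PySem.Int.floordiv old_r r * r) +
          PySem.Int.floordiv old_r r * r = old_r := by ring
      rwa [hor] at hsum
    · rw [dif_neg h]
      exact ⟨dvd_rfl, by simp [not_not.mp h]⟩

theorem invLoop_nonneg (old_r r old_s s : Int) (h1 : 0 ≤ old_r) (h2 : 0 ≤ r) :
    0 ≤ (invLoop old_r r old_s s).1 := by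
  induction hn : r.natAbs using Nat.strong_induction_on generalizing old_r r old_s s with
  | _ n ih =>
    rw [invLoop]
    by_cases h : r ≠ 0
    · rw [dif_pos h]
      have he : old_r - PySem.Int.floordiv old_r r * r = PySem.Int.mod old_r r := by
        have := PySem.Int.floordiv_mul_add_mod old_r r; linarith
      have hlt : (old_r - PySem.Int.floordiv old_r r * r).natAbs < n := by
        rw [he]; exact hn ▸ pymod_natAbs_lt old_r r h
      refine ih _ hlt _ _ _ _ h2 ?_ rfl
      rw [he]; exact PySem.Int.mod_nonneg old_r (by omega)
    · rw [dif_neg h]; exact h1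

-- the coefficient invariant: nn ∣ a*old_s - old_r and nn ∣ a*s - r are preserved
theorem invLoop_cong (nn a : Int) (old_r r old_s s : Int)
    (h1 : nn ∣ a * old_s - old_r) (h2 : nn ∣ a * s - r) :
    nn ∣ a * (invLoop old_r r old_s s).2 - (invLoop old_r r old_s s).1 := by
  induction hn : r.natAbs using Nat.strong_induction_on generalizing old_r r old_s s with
  | _ n ih =>
    rw [invLoop]
    by_cases h : r ≠ 0
    · rw [dif_pos h]
      have he : old_r - PySem.Int.floordiv old_r r * r = PySem.Int.mod old_r r := by
        have := PySem.Int.floordiv_mul_add_mod old_r r; linarith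
      have hlt : (old_r - PySem.Int.floordiv old_r r * r).natAbs < n := by
        rw [he]; exact hn ▸ pymod_natAbs_lt old_r r h
      refine ih _ hlt _ _ _ _ h2 ?_ rfl
      obtain ⟨t, ht⟩ := h1; obtain ⟨u, hu⟩ := h2
      exact ⟨t - PySem.Int.floordiv old_r r * u,
        by linear_combination ht - PySem.Int.floordiv old_r r * hu⟩
    · rw [dif_neg h]; exact h1

-- under Pre_ (nth ≥ 1 branch) B's loop ends with old_r = 1, so pyInv is an inverse of a mod m
theorem pyInv_inv (a m : Int) (hm : m ≠ 0)
    (h : (0 < a ∧ Int.gcd a m = 1) ∨ (a = 0 ∧ m = 1)) :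
    m ∣ a * pyInv a m - 1 := by
  rcases h with ⟨ha, hg⟩ | ⟨ha, hm1⟩
  · have hg1 : (invLoop a |m| 1 0).1 = 1 := by
      obtain ⟨d1, d2⟩ := invLoop_dvd a |m| 1 0
      have hdm : (invLoop a |m| 1 0).1 ∣ m := (dvd_abs _ _).mp d2
      have hdg : (invLoop a |m| 1 0).1.natAbs ∣ Int.gcd a m :=
        Nat.dvd_gcd (Int.natAbs_dvd_natAbs.mpr d1) (Int.natAbs_dvd_natAbs.mpr hdm)
      rw [hg] at hdg
      have habs : (invLoop a |m| 1 0).1.natAbs = 1 := Nat.dvd_one.mp hdg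
      have hnn : 0 ≤ (invLoop a |m| 1 0).1 :=
        invLoop_nonneg a |m| 1 0 (by omega) (abs_nonneg m)
      omega
    unfold pyInv
    rw [if_neg (by simp [hg1])]
    have hcong : m ∣ a * (invLoop a |m| 1 0).2 - (invLoop a |m| 1 0).1 := by
      refine invLoop_cong m a a |m| 1 0 ⟨0, by ring⟩ ?_
      refine dvd_sub ⟨0, by ring⟩ ((dvd_abs m m).mpr dvd_rfl)
    rw [hg1] at hcong
    obtain ⟨u, hu⟩ := mdvd_sub_mod (m := m) (invLoop a |m| 1 0).2
    obtain ⟨t, ht⟩ := hcong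
    exact ⟨a * u + t, by linear_combination a * hu + ht⟩
  · rw [hm1]; exact one_dvd _

-- any two modular inverses of a are congruent mod m when gcd(a,m) = 1
theorem modInv_unique {a m b1 b2 : Int} (hg : Int.gcd a m = 1)
    (h1 : m ∣ a * b1 - 1) (h2 : m ∣ a * b2 - 1) : m ∣ b1 - b2 := by
  obtain ⟨u, v, huv⟩ := (Int.isCoprime_iff_gcd_eq_one.mpr hg)
  obtain ⟨t1, ht1⟩ := h1; obtain ⟨t2, ht2⟩ := h2
  exact ⟨u * t1 - u * t2 + v * (b1 - b2),
    by linear_combination u * ht1 - u * ht2 - (b1 - b2) * huv⟩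

theorem pow_geo_cong {m b1 b2 : Int} (h : m ∣ b1 - b2) (j : Nat) :
    m ∣ b1 ^ j - b2 ^ j ∧ m ∣ geo b1 j - geo b2 j := by
  induction j with
  | zero => simp [geo]
  | succ i ih =>
    constructor
    · rw [pow_succ, pow_succ]
      exact dvd_sub_mul ih.1 h
    · rw [geo, geo]
      refine dvd_sub_mul h ?_
      obtain ⟨t, ht⟩ := ih.2
      exact ⟨t, by linear_combination ht⟩

-- A's loop body iterated j times is congruent to the closed form c^j*x - k*geo c j
theorem stepIter_cong (m : Int) (hm : m ≠ 0) (k c : Int) (j : Nat) (x : Int) :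
    m ∣ (fun r => PySem.Int.mod (PySem.Int.mod (r - k) m * c) m)^[j] x -
      (c ^ j * x - k * geo c j) := by
  induction j with
  | zero => simp [geo]
  | succ i ih =>
    rw [Function.iterate_succ_apply']
    set y := (fun r => PySem.Int.mod (PySem.Int.mod (r - k) m * c) m)^[i] x with hy
    obtain ⟨t, ht⟩ := ih
    obtain ⟨u, hu⟩ := mdvd_sub_mod (m := m) (y - k)
    obtain ⟨v, hv⟩ := mdvd_sub_mod (m := m) (PySem.Int.mod (y - k) m * c)
    refine ⟨v + u * c + c * t, ?_⟩
    rw [geo, pow_succ]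
    linear_combination hv + c * hu + c * ht

-- for j ≥ 1 A's iterate is exactly the reduced closed form
theorem A_iter_eq (m : Int) (hm : m ≠ 0) (k c : Int) (j : Nat) (x : Int) :
    (fun r => PySem.Int.mod (PySem.Int.mod (r - k) m * c) m)^[j + 1] x =
      PySem.Int.mod (c ^ (j + 1) * x - k * geo c (j + 1)) m := by
  have hfix : (fun r => PySem.Int.mod (PySem.Int.mod (r - k) m * c) m)^[j + 1] x =
      PySem.Int.mod ((fun r => PySem.Int.mod (PySem.Int.mod (r - k) m * c) m)^[j + 1] x) m := by
    rw [Function.iterate_succ_apply']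
    exact (pymod_pymod hm _).symm
  rw [hfix]
  exact pymod_congr hm (stepIter_cong m hm k c (j + 1) x)

-- foldl with a body that ignores the element is iteration
theorem foldl_const_iterate {α β : Type} (f : α → α) (l : List β) (init : α) :
    l.foldl (fun r _ => f r) init = f^[l.length] init := by
  induction l generalizing init with
  | nil => rfl
  | cons x xs ih => simp [List.foldl, ih, Function.iterate_succ_apply]

-- B's halving recursion computes the reduced power and geometric sum
theorem powGeom_spec (m : Int) (hm : m ≠ 0) :
    ∀ (N : Nat) (n c : Int), n.toNat = N → 1 ≤ n →
      powGeom c n m = (PySem.Int.mod (c ^ N) m, PySem.Int.mod (geo c N) m) := by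
  intro N
  induction N using Nat.strong_induction_on with
  | _ N ih =>
    intro n c hN hn1
    rw [powGeom]
    by_cases h : n ≤ 1
    · have hn : n = 1 := le_antisymm h hn1
      have hN1 : N = 1 := by omega
      simp only [h, dite_true, hN1, pow_one]
      have hgeo : geo c 1 = c := by simp [geo]
      rw [hgeo]
    · simp only [h, dite_false]
      have hfd : PySem.Int.floordiv n 2 = n / 2 :=
        PySem.Int.floordiv_eq_ediv_of_pos (by omega)
      have hmd : PySem.Int.mod n 2 = n % 2 :=
        PySem.Int.mod_eq_emod_of_pos (by omega)
      have hge2 : 2 ≤ n := by omega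
      have hh1 : 1 ≤ n / 2 := by omega
      have hem := Int.ediv_add_emod n 2
      have hemlt : n % 2 = 0 ∨ n % 2 = 1 := Int.emod_two_eq_zero_or_one n
      set H := (n / 2).toNat with hH
      have hHlt : H < N := by omega
      have hrec := ih H hHlt (n / 2) c rfl hh1
      rw [hfd, hrec]
      dsimp only
      have hp : PySem.Int.mod (PySem.Int.mod (c ^ H) m * PySem.Int.mod (c ^ H) m) m =
          PySem.Int.mod (c ^ (H + H)) m := by
        refine pymod_congr hm ?_
        rw [pow_add]
        exact dvd_sub_mul (mdvd_sub_mod _) (mdvd_sub_mod _)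
      have hs : PySem.Int.mod (PySem.Int.mod (geo c H) m * (1 + PySem.Int.mod (c ^ H) m)) m =
          PySem.Int.mod (geo c (H + H)) m := by
        refine pymod_congr hm ?_
        have hga : geo c (H + H) = geo c H * (1 + c ^ H) := by
          rw [geo_add]; ring
        rw [hga]
        refine dvd_sub_mul (mdvd_sub_mod _) ?_
        obtain ⟨u, hu⟩ := mdvd_sub_mod (m := m) (c ^ H)
        exact ⟨u, by linear_combination hu⟩
      rcases hemlt with he0 | he1
      · have hne : ¬ PySem.Int.mod n 2 = 1 := by rw [hmd]; omega
        rw [if_neg hne, hp, hs]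
        have : H + H = N := by omega
        rw [this]
      · rw [hmd, if_pos he1, hp, hs]
        have hNodd : N = (H + H) + 1 := by omega
        rw [hNodd]
        have hc1 : PySem.Int.mod (PySem.Int.mod (c ^ (H + H)) m * c) m =
            PySem.Int.mod (c ^ ((H + H) + 1)) m := by
          refine pymod_congr hm ?_
          rw [pow_succ]
          exact dvd_sub_mul (mdvd_sub_mod _) ⟨0, by ring⟩
        have hc2 : PySem.Int.mod (PySem.Int.mod (geo c (H + H)) m * c + c) m =
            PySem.Int.mod (geo c ((H + H) + 1)) m := by
          refine pymod_congr hm ?_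
          rw [geo]
          obtain ⟨u, hu⟩ := mdvd_sub_mod (m := m) (geo c (H + H))
          exact ⟨u * c, by linear_combination c * hu⟩
        rw [hc1, hc2]

-- ===== VERDICT (by name: the statement is the Claim_ definition above) =====
theorem calcSeed_spec : Claim_equal_calcSeed := by
  intro a k m nr nth _ hpre
  unfold Spec_calcSeed calcSeed calcSeed_alt
  by_cases hn : nth ≤ 0
  · rw [PySem.List.pyRange_one_eq_nil hn]
    simp [hn]
  · have hbr : m ≠ 0 ∧ ((0 < a ∧ Int.gcd a m = 1) ∨ (a = 0 ∧ m = 1)) := by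
      rcases hpre with h | h
      · omega
      · exact h
    obtain ⟨hm, hco⟩ := hbr
    have hg : Int.gcd a m = 1 := by
      rcases hco with ⟨_, h1⟩ | ⟨ha, hm1⟩
      · exact h1
      · rw [ha, hm1]; decide
    rw [if_neg hn]
    rw [foldl_const_iterate
      (fun retval => PySem.Int.mod (PySem.Int.mod (retval - k) m * pyModinv a m) m)
      (PySem.List.pyRange 0 nth 1) nr]
    rw [PySem.List.length_pyRange_one]
    set bA := pyModinv a m with hbA
    set bB := pyInv a m with hbB
    have hNeq : (nth - 0).toNat = nth.toNat := by omega
    rw [hNeq]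
    obtain ⟨J, hJ⟩ : ∃ J, nth.toNat = J + 1 := ⟨nth.toNat - 1, by omega⟩
    rw [hJ, A_iter_eq m hm k bA J nr]
    have hPG := powGeom_spec m hm nth.toNat nth bB rfl (by omega)
    rw [hJ] at hPG
    show PySem.Int.mod (bA ^ (J + 1) * nr - k * geo bA (J + 1)) m =
      PySem.Int.mod ((powGeom bB nth m).1 * nr - k * (powGeom bB nth m).2) m
    rw [hPG]
    dsimp only
    have hAB : m ∣ bA - bB := modInv_unique hg (pyModinv_inv a m hm hco) (pyInv_inv a m hm hco)
    obtain ⟨hpw, hge⟩ := pow_geo_cong hAB (J + 1)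
    refine pymod_congr hm ?_
    obtain ⟨p, hp⟩ := hpw
    obtain ⟨g, hgeo⟩ := hge
    obtain ⟨u, hu⟩ := mdvd_sub_mod (m := m) (bB ^ (J + 1))
    obtain ⟨v, hv⟩ := mdvd_sub_mod (m := m) (geo bB (J + 1))
    exact ⟨p * nr - k * g - u * nr + k * v,
      by linear_combination nr * hp - k * hgeo - nr * hu + k * hv⟩
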